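-- pv_equiv track=rewrite | github.com/iXioN/groover-concert-planning | concert_prog.py | _is_programation_possible_for_number_of_track
-- ===== SOURCE A (Python) =====
-- from typing import FrozenSet, Generator, Iterable, Iterator, List, Tuple, Union
--
-- def combinations(items: Union[List, Tuple], n: int) -> Iterator[Tuple[int]]:
--     """
--     A generator that yield all the UNIQUE combination items with n elements
--     Args:
--         items (list or tuple): The sequence of item to combine
--         n (int): The length of elements that will be present in the returned subsequences
--
--     Yields:
--         Iterator[Tuple[int]]: n lenght subsequences of elements combined from items
--     """
--     if n == 0:
--         yield tuple()
--     else: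
--         for i in range(len(items)):
--             for sub in combinations(items[i + 1 :], n - 1):
--                 item = items[i]
--                 item = [item] if isinstance(item, int) else item
--                 yield tuple(item) + sub
--
-- def _is_programation_possible_for_number_of_track(
--     concert_premiere_length: int,
--     track_lenghts: Iterable[int],
--     number_of_tracks: int,
--     tolerence: int = 0,
-- ) -> bool:
--     """
--     a function that return a boolean depending if the programation is possible based on a possible number of tracks
--
--     Args:
--         concert_premiere_length (int): an integer that represent the time in minute of a concert premier
--         track_lenghts (Itcerable[int]): an iterable containing int that represent the track length in minutes
--         number_of_tracks (bool, optional): do you want to use the number of track to MAXIMUM_NUMBER_OF_TRACKS. Defaults to True.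
--         tolerence (int, optional): The tolenrence in minutes the sum of track lenght can be arround the concert_premiere_length. Defaults to 0.
--
--     Returns:
--         bool: is the programation possible
--     """
--     for possible_tracks in combinations(track_lenghts, number_of_tracks):
--         # do the sum and verify if the sum is around the concert_premiere_length +/- the tolerence
--         if abs(sum(possible_tracks) - concert_premiere_length) <= tolerence:
--             return True
--     return False
-- ===== SOURCE B (Python) =====
-- def _is_programation_possible_for_number_of_track(
--     concert_premiere_length,
--     track_lenghts,
--     number_of_tracks,
--     tolerence=0,
-- ):
--     # Dynamic programming over (track count, total length) states: one pass
--     # over the tracks, keeping the set of achievable (count, sum) pairs with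
--     # count capped at number_of_tracks, instead of enumerating combinations.
--     if number_of_tracks < 0:
--         return False
--     states = {(0, 0)}
--     for t in track_lenghts:
--         states |= {(k + 1, s + t) for (k, s) in states if k < number_of_tracks}
--     return any(
--         k == number_of_tracks and abs(s - concert_premiere_length) <= tolerence
--         for (k, s) in states
--     )
-- ===== Notes on version B (the rewrite author's own statement) =====
-- stated objective: alternative
-- what changed: Replaces the recursive enumeration of all C(n,k) combinations by a one-pass dynamic program over the set of reachable (track count, total length) states, capped at the requested count.
import Mathlib
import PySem

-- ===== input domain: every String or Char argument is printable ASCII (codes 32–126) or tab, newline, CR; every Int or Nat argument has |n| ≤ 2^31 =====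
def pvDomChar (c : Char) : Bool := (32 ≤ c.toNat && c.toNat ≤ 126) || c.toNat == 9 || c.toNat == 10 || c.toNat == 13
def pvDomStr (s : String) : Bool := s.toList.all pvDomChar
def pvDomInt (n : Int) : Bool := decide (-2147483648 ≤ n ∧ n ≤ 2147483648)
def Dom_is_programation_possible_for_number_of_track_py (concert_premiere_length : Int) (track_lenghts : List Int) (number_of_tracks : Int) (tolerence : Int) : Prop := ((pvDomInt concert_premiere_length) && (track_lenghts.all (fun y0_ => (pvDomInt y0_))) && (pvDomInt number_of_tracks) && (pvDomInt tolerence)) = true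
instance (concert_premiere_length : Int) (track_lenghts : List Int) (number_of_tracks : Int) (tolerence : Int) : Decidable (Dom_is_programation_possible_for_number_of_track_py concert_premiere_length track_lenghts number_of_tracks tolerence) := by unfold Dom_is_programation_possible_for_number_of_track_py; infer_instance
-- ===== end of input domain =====

-- B replaces A's enumeration of all k-element combinations by a one-pass set DP over
-- reachable (track count, total length) states; equivalence of the two ports is proved below.
-- ===== PORT A =====
-- combinations(items, n): yields all n-element combinations; the index loop over i with
-- recursion on items[i+1:] is transcribed as the peeled loop: head case (i = 0) ++ rest of the loop.
def pvCombA (items : List Int) (n : Int) : List (List Int) :=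
  if n = 0 then [[]]
  else match items with
  | [] => []
  | x :: rest => ((pvCombA rest (n-1)).map (fun sub => x :: sub)) ++ pvCombA rest n

def is_programation_possible_for_number_of_track_py (concert_premiere_length : Int) (track_lenghts : List Int) (number_of_tracks : Int) (tolerence : Int) : Bool :=
  (pvCombA track_lenghts number_of_tracks).any
    (fun possible_tracks => decide (|possible_tracks.sum - concert_premiere_length| ≤ tolerence))

-- ===== PORT B =====
-- states |= {(k+1, s+t) for (k, s) in states if k < number_of_tracks}
def pvStepB (K : Int) (st : PySem.Set (Int × Int)) (t : Int) : PySem.Set (Int × Int) :=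
  PySem.Set.union st
    (PySem.Set.ofList ((st.filter (fun p => decide (p.1 < K))).map (fun p => (p.1 + 1, p.2 + t))))

def is_programation_possible_for_number_of_track_py_alt (concert_premiere_length : Int) (track_lenghts : List Int) (number_of_tracks : Int) (tolerence : Int) : Bool :=
  if number_of_tracks < 0 then false
  else
    let states := track_lenghts.foldl (pvStepB number_of_tracks) (PySem.Set.ofList [((0:Int), (0:Int))])
    states.any (fun p => p.1 == number_of_tracks && decide (|p.2 - concert_premiere_length| ≤ tolerence))

-- ===== PRECONDITION & SPEC =====
def Spec_is_programation_possible_for_number_of_track_py (concert_premiere_length : Int) (track_lenghts : List Int) (number_of_tracks : Int) (tolerence : Int) (out : Bool) : Prop := out = is_programation_possible_for_number_of_track_py_alt concert_premiere_length track_lenghts number_of_tracks tolerence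
instance (concert_premiere_length : Int) (track_lenghts : List Int) (number_of_tracks : Int) (tolerence : Int) (out : Bool) : Decidable (Spec_is_programation_possible_for_number_of_track_py concert_premiere_length track_lenghts number_of_tracks tolerence out) := by unfold Spec_is_programation_possible_for_number_of_track_py; infer_instance

-- ===== CLAIM (what is proved, stated in full; the proofs are below) =====
def Claim_equal_is_programation_possible_for_number_of_track_py : Prop := ∀ (concert_premiere_length : Int) (track_lenghts : List Int) (number_of_tracks : Int) (tolerence : Int), Dom_is_programation_possible_for_number_of_track_py concert_premiere_length track_lenghts number_of_tracks tolerence → Spec_is_programation_possible_for_number_of_track_py concert_premiere_length track_lenghts number_of_tracks tolerence (is_programation_possible_for_number_of_track_py concert_premiere_length track_lenghts number_of_tracks tolerence)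

-- ===== LEMMAS AND PROOFS =====
lemma mem_pvCombA (sub : List Int) : ∀ (items : List Int) (n : Int),
    sub ∈ pvCombA items n ↔ sub.Sublist items ∧ (sub.length : Int) = n := by
  intro items
  induction items generalizing sub with
  | nil =>
    intro n
    rw [pvCombA]
    by_cases hn : n = 0
    · subst hn; simp [List.sublist_nil]
    · simp [hn, List.sublist_nil]
      rintro rfl; simp; omega
  | cons x rest ih =>
    intro n
    rw [pvCombA]
    by_cases hn : n = 0
    · subst hn
      simp only [if_true, List.mem_singleton]
      constructor
      · rintro rfl; simp
      · rintro ⟨-, hlen⟩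
        have : sub.length = 0 := by omega
        simpa [List.length_eq_zero_iff] using this
    · simp only [hn, if_false, List.mem_append, List.mem_map]
      rw [List.sublist_cons_iff]
      constructor
      · rintro (⟨s, hs, rfl⟩ | h)
        · obtain ⟨hsl, hlen⟩ := (ih s _).1 hs
          refine ⟨Or.inr ⟨s, rfl, hsl⟩, by simp; omega⟩
        · obtain ⟨hsl, hlen⟩ := (ih sub _).1 h
          exact ⟨Or.inl hsl, hlen⟩
      · rintro ⟨hsl | ⟨r, rfl, hr⟩, hlen⟩
        · exact Or.inr ((ih sub n).2 ⟨hsl, hlen⟩)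
        · refine Or.inl ⟨r, (ih r (n-1)).2 ⟨hr, by simp at hlen ⊢; omega⟩, rfl⟩

lemma mem_pvStepB (K : Int) (st : PySem.Set (Int × Int)) (t : Int) (p : Int × Int) :
    p ∈ pvStepB K st t ↔ p ∈ st ∨ ∃ r ∈ st, r.1 < K ∧ p = (r.1 + 1, r.2 + t) := by
  unfold pvStepB
  rw [PySem.Set.mem_union, PySem.Set.mem_ofList]
  simp only [List.mem_map, List.mem_filter, decide_eq_true_eq]
  constructor
  · rintro (h | ⟨r, ⟨hr, hrK⟩, rfl⟩)
    · exact Or.inl h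
    · exact Or.inr ⟨r, hr, hrK, rfl⟩
  · rintro (h | ⟨r, hr, hrK, rfl⟩)
    · exact Or.inl h
    · exact Or.inr ⟨r, ⟨hr, hrK⟩, rfl⟩

lemma mem_foldB (K : Int) : ∀ (tl : List Int) (st : List (Int × Int)) (p : Int × Int),
    p ∈ tl.foldl (pvStepB K) st ↔ p ∈ st ∨
      ∃ q ∈ st, ∃ sub : List Int, sub.Sublist tl ∧ sub ≠ [] ∧
        p.1 = q.1 + sub.length ∧ p.2 = q.2 + sub.sum ∧ p.1 ≤ K := by
  intro tl
  induction tl with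
  | nil => intro st p; simp
  | cons t rest ih =>
    intro st p
    rw [List.foldl_cons, ih]
    constructor
    · rintro (h | ⟨q, hq, sub, hsl, hne, h1, h2, hK⟩)
      · rw [mem_pvStepB] at h
        rcases h with h | ⟨r, hr, hrK, rfl⟩
        · exact Or.inl h
        · exact Or.inr ⟨r, hr, [t], by simp, by simp, by simp, by simp, by simp; omega⟩
      · rw [mem_pvStepB] at hq
        rcases hq with hq | ⟨r, hr, hrK, rfl⟩
        · exact Or.inr ⟨q, hq, sub, hsl.cons t, hne, h1, h2, hK⟩
        · refine Or.inr ⟨r, hr, t :: sub, hsl.cons₂ t, by simp, ?_, ?_, hK⟩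
          · simp at h1 ⊢; omega
          · simp at h2 ⊢; omega
    · rintro (h | ⟨q, hq, sub, hsl, hne, h1, h2, hK⟩)
      · exact Or.inl (by rw [mem_pvStepB]; exact Or.inl h)
      · rw [List.sublist_cons_iff] at hsl
        rcases hsl with hsl | ⟨r, rfl, hr⟩
        · exact Or.inr ⟨q, by rw [mem_pvStepB]; exact Or.inl hq, sub, hsl, hne, h1, h2, hK⟩
        · have hqK : q.1 < K := by simp at h1; omega
          have hq' : (q.1 + 1, q.2 + t) ∈ pvStepB K st t := by
            rw [mem_pvStepB]; exact Or.inr ⟨q, hq, hqK, rfl⟩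
          rcases eq_or_ne r [] with rfl | hr0
          · left
            have : p = (q.1 + 1, q.2 + t) := by
              simp at h1 h2
              exact Prod.ext (by omega) (by omega)
            rwa [this]
          · refine Or.inr ⟨(q.1 + 1, q.2 + t), hq', r, hr, hr0, ?_, ?_, hK⟩
            · simp at h1 ⊢; omega
            · simp at h2 ⊢; omega

-- ===== VERDICT =====
theorem is_programation_possible_for_number_of_track_py_spec : Claim_equal_is_programation_possible_for_number_of_track_py := by
  intro c tl k tol _
  unfold Spec_is_programation_possible_for_number_of_track_py
  unfold is_programation_possible_for_number_of_track_py is_programation_possible_for_number_of_track_py_alt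
  rw [Bool.eq_iff_iff, List.any_eq_true]
  by_cases hk : k < 0
  · simp only [hk, if_true, Bool.false_eq_true, iff_false]
    rintro ⟨sub, hmem, -⟩
    have := (mem_pvCombA sub tl k).1 hmem
    omega
  · simp only [hk, if_false, List.any_eq_true]
    constructor
    · rintro ⟨sub, hmem, hpred⟩
      obtain ⟨hsl, hlen⟩ := (mem_pvCombA sub tl k).1 hmem
      by_cases hnil : sub = []
      · subst hnil
        refine ⟨((0:Int), (0:Int)), ?_, ?_⟩
        · rw [mem_foldB]; left; simp [PySem.Set.ofList]
        · simp at hlen hpred ⊢; simp [← hlen, hpred]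
      · refine ⟨((sub.length : Int), sub.sum), ?_, ?_⟩
        · rw [mem_foldB]; right
          exact ⟨((0:Int),(0:Int)), by simp [PySem.Set.ofList], sub, hsl, hnil, by simp, by simp, by omega⟩
        · simp [hlen, hpred]
    · rintro ⟨p, hmem, hpred⟩
      rw [mem_foldB] at hmem
      simp only [Bool.and_eq_true, beq_iff_eq, decide_eq_true_eq] at hpred
      obtain ⟨hp1, hp2⟩ := hpred
      rcases hmem with h0 | ⟨q, hq, sub, hsl, -, hlen, hsum, -⟩
      · have : p = ((0:Int), (0:Int)) := by simpa [PySem.Set.ofList] using h0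
        subst this
        refine ⟨[], ?_, ?_⟩
        · rw [mem_pvCombA]; simp at hp1 ⊢; omega
        · simpa using hp2
      · have hq0 : q = ((0:Int), (0:Int)) := by simpa [PySem.Set.ofList] using hq
        subst hq0
        refine ⟨sub, ?_, ?_⟩
        · rw [mem_pvCombA]; simp at hlen; exact ⟨hsl, by omega⟩
        · simp at hsum; rw [hsum] at hp2; simpa using hp2
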